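-- pv_equiv track=rewrite | github.com/vuquangtien/mAIware---AI | classification_utils.py | summarize_classes
-- ===== SOURCE A (Python) =====
-- from typing import Iterable, List, Sequence, Tuple
--
-- CLASS_NAMES = ('benign', 'suspicious', 'malware')
--
-- def summarize_classes(class_names: Iterable[str]) -> dict[str, int]:
--     counts: dict[str, int] = {name: 0 for name in CLASS_NAMES}
--     counts.update({'unknown': 0})
--     for name in class_names:
--         if name in counts:
--             counts[name] += 1
--         else:
--             counts['unknown'] += 1
--     return counts
-- ===== SOURCE B (Python) =====
-- CLASS_NAMES = ('benign', 'suspicious', 'malware')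
--
-- def summarize_classes(class_names):
--     names = list(class_names)
--     benign = names.count('benign')
--     suspicious = names.count('suspicious')
--     malware = names.count('malware')
--     return {
--         'benign': benign,
--         'suspicious': suspicious,
--         'malware': malware,
--         'unknown': len(names) - benign - suspicious - malware,
--     }
-- ===== Notes on version B (the rewrite author's own statement) =====
-- stated objective: simpler
-- what changed: Replaces A's zero-initialized dict and per-element membership/update loop with three list.count passes plus a length subtraction that derives the 'unknown' bucket (so 'unknown' strings land there arithmetically, as in A).
import Mathlib
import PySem

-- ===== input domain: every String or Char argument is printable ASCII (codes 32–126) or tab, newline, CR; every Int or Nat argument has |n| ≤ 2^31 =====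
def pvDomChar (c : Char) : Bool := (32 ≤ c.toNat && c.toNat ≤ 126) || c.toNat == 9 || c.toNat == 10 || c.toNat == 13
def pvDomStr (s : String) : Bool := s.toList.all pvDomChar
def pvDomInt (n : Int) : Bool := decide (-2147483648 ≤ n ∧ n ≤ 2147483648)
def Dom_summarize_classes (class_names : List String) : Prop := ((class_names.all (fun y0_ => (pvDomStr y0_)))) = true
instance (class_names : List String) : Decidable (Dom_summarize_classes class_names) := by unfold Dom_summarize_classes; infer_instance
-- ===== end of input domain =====

-- B replaces A's per-element dict-update loop by three list.count passes and a
-- length subtraction for the 'unknown' bucket (objective: simpler; same value).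

-- ===== PORT A =====
-- CLASS_NAMES = ('benign', 'suspicious', 'malware')  — module constant, iterated as a sequence
def CLASS_NAMES : List String := ["benign", "suspicious", "malware"]

def summarize_classes (class_names : List String) : List (String × Int) :=
  -- counts = {name: 0 for name in CLASS_NAMES}
  let counts : PySem.Dict String Int :=
    PySem.Dict.ofList (CLASS_NAMES.map (fun name => (name, (0 : Int))))
  -- counts.update({'unknown': 0})
  let counts := counts.update [("unknown", (0 : Int))]
  -- for name in class_names: if name in counts: counts[name] += 1 else: counts['unknown'] += 1
  let counts := class_names.foldl
    (fun d name =>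
      if d.contains name then d.modify name 0 (· + 1)
      else d.modify "unknown" 0 (· + 1)) counts
  counts.items

-- ===== PORT B =====
def summarize_classes_alt (class_names : List String) : List (String × Int) :=
  let names := class_names                                   -- names = list(class_names)
  let benign : Int := PySem.List.count names "benign"
  let suspicious : Int := PySem.List.count names "suspicious"
  let malware : Int := PySem.List.count names "malware"
  [("benign", benign), ("suspicious", suspicious), ("malware", malware),
   ("unknown", (names.length : Int) - benign - suspicious - malware)]

-- ===== PRECONDITION & SPEC =====
def Spec_summarize_classes (class_names : List String) (out : List (String × Int)) : Prop := out = summarize_classes_alt class_names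
instance (class_names : List String) (out : List (String × Int)) : Decidable (Spec_summarize_classes class_names out) := by unfold Spec_summarize_classes; infer_instance

-- ===== CLAIM (what is proved, stated in full; the proofs are below) =====
def Claim_equal_summarize_classes : Prop := ∀ (class_names : List String), Dom_summarize_classes class_names → Spec_summarize_classes class_names (summarize_classes class_names)

-- ===== LEMMAS AND PROOFS =====

-- Invariant of A's loop: starting from the four-key dict with values b, s, m, u, the loop
-- adds the occurrence counts of the three class names and routes everything else to 'unknown'.
lemma summarize_classes_loop (l : List String) (b s m u : Int) :
    l.foldl
      (fun d name =>
        if d.contains name then d.modify name 0 (· + 1)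
        else d.modify "unknown" 0 (· + 1))
      (PySem.Dict.mk [("benign", b), ("suspicious", s), ("malware", m), ("unknown", u)])
    = PySem.Dict.mk
        [("benign", b + l.count "benign"),
         ("suspicious", s + l.count "suspicious"),
         ("malware", m + l.count "malware"),
         ("unknown", u + ((l.length : Int) - l.count "benign" - l.count "suspicious" - l.count "malware"))] := by
  induction l generalizing b s m u with
  | nil => simp
  | cons x xs ih =>
    simp only [List.foldl_cons]
    by_cases h1 : x = "benign"
    · subst h1
      rw [show (if (PySem.Dict.mk [("benign", b), ("suspicious", s), ("malware", m), ("unknown", u)]).contains "benign"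
            then (PySem.Dict.mk [("benign", b), ("suspicious", s), ("malware", m), ("unknown", u)]).modify "benign" 0 (· + 1)
            else (PySem.Dict.mk [("benign", b), ("suspicious", s), ("malware", m), ("unknown", u)]).modify "unknown" 0 (· + 1))
          = PySem.Dict.mk [("benign", b + 1), ("suspicious", s), ("malware", m), ("unknown", u)] from rfl]
      rw [ih]
      simp
      omega
    · by_cases h2 : x = "suspicious"
      · subst h2
        rw [show (if (PySem.Dict.mk [("benign", b), ("suspicious", s), ("malware", m), ("unknown", u)]).contains "suspicious"
              then (PySem.Dict.mk [("benign", b), ("suspicious", s), ("malware", m), ("unknown", u)]).modify "suspicious" 0 (· + 1)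
              else (PySem.Dict.mk [("benign", b), ("suspicious", s), ("malware", m), ("unknown", u)]).modify "unknown" 0 (· + 1))
            = PySem.Dict.mk [("benign", b), ("suspicious", s + 1), ("malware", m), ("unknown", u)] from rfl]
        rw [ih]
        simp
        omega
      · by_cases h3 : x = "malware"
        · subst h3
          rw [show (if (PySem.Dict.mk [("benign", b), ("suspicious", s), ("malware", m), ("unknown", u)]).contains "malware"
                then (PySem.Dict.mk [("benign", b), ("suspicious", s), ("malware", m), ("unknown", u)]).modify "malware" 0 (· + 1)
                else (PySem.Dict.mk [("benign", b), ("suspicious", s), ("malware", m), ("unknown", u)]).modify "unknown" 0 (· + 1))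
              = PySem.Dict.mk [("benign", b), ("suspicious", s), ("malware", m + 1), ("unknown", u)] from rfl]
          rw [ih]
          simp
          omega
        · by_cases h4 : x = "unknown"
          · subst h4
            rw [show (if (PySem.Dict.mk [("benign", b), ("suspicious", s), ("malware", m), ("unknown", u)]).contains "unknown"
                  then (PySem.Dict.mk [("benign", b), ("suspicious", s), ("malware", m), ("unknown", u)]).modify "unknown" 0 (· + 1)
                  else (PySem.Dict.mk [("benign", b), ("suspicious", s), ("malware", m), ("unknown", u)]).modify "unknown" 0 (· + 1))
                = PySem.Dict.mk [("benign", b), ("suspicious", s), ("malware", m), ("unknown", u + 1)] from rfl]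
            rw [ih]
            simp
            omega
          · have hc : (PySem.Dict.mk [("benign", b), ("suspicious", s), ("malware", m), ("unknown", u)]).contains x = false := by
              simp [PySem.Dict.contains, Ne.symm h1, Ne.symm h2, Ne.symm h3, Ne.symm h4]
            rw [if_neg (by simp [hc]),
                show (PySem.Dict.mk [("benign", b), ("suspicious", s), ("malware", m), ("unknown", u)]).modify "unknown" 0 (· + 1)
                  = PySem.Dict.mk [("benign", b), ("suspicious", s), ("malware", m), ("unknown", u + 1)] from rfl]
            rw [ih]
            simp [h1, h2, h3]
            omega

-- ===== VERDICT (by name: the statement is the Claim_ definition above) =====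
theorem summarize_classes_spec : Claim_equal_summarize_classes := by
  intro class_names _
  unfold Spec_summarize_classes
  show (List.foldl
      (fun d name =>
        if d.contains name then d.modify name 0 (· + 1)
        else d.modify "unknown" 0 (· + 1))
      (PySem.Dict.mk [("benign", 0), ("suspicious", 0), ("malware", 0), ("unknown", 0)]) class_names).items
    = summarize_classes_alt class_names
  rw [summarize_classes_loop]
  simp [summarize_classes_alt, PySem.List.count_eq]
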